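-- pv_equiv track=rewrite | github.com/jeanm/nlip | nlip/parsing/contexts.py | get_phrase_window
-- ===== SOURCE A (Python) =====
-- def get_window(index, length, k=2):
--     """Return a list of tuples (pos, dist_from_centre) for index's window"""
--     start_win = max(0, index - k)
--     end_win = min(length - 1, index + k)
--     return sorted(((pos,abs(index-pos)) for pos in range(start_win, end_win+1)
--             if pos != index), key=lambda x: x[1])
--
-- def get_phrase_window(indices, length, k=2):
--     window = [k+1] * length  # maps position in sentence to smallest distance from index word
--     indices = set(indices)  # used to make sure I don't include indices in the window
--     for index in indices:
--         for pos, distance in get_window(index, length, k):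
--             if distance < window[pos]:  # only update distance if lower than what we already found
--                 window[pos] = distance
--     # positions are sorted by smallest distance from any index word, and
--     # do not include index words themselves
--     return sorted((tuple(element) for element in enumerate(window)
--             if element[1] <= k and element[0] not in indices),
--             key=lambda x: x[1])
-- ===== SOURCE B (Python) =====
-- def get_phrase_window(indices, length, k=2):
--     idx = set(indices)
--     results = []
--     for pos in range(length):
--         if pos in idx:
--             continue
--         d = min((abs(pos - i) for i in idx), default=k + 1)
--         if d <= k:
--             results.append((pos, d))
--     return sorted(results, key=lambda x: x[1])
-- ===== Notes on version B (the rewrite author's own statement) =====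
-- stated objective: simpler
-- what changed: Replaced A's scatter-and-update distance array (for each index word, generate and sort its window, then update a length-sized array cell by cell) by a direct per-position scan that computes each position's minimum distance to any index word with one min(...) expression.
import Mathlib
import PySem

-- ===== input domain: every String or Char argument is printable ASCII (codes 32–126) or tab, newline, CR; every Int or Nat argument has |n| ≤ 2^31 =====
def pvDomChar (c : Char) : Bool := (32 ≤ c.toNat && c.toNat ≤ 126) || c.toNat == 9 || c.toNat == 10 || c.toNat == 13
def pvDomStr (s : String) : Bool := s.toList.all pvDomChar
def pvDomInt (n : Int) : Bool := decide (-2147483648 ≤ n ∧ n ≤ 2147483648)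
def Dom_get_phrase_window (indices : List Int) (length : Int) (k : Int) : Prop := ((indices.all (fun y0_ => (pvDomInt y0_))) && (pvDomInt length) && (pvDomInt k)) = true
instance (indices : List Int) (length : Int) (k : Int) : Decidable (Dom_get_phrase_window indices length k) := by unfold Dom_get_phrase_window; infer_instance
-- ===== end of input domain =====

-- B replaces A's scatter-and-update window array by a direct per-position minimum-distance scan (simpler, one formula per position).

-- ===== PORT A =====
def get_window (index length k : Int) : List (Int × Int) :=
  let start_win := max 0 (index - k)
  let end_win := min (length - 1) (index + k)
  PySem.List.sorted
    (((PySem.List.pyRange start_win (end_win + 1)).filter (fun pos => pos != index)).map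
      (fun pos => (pos, |index - pos|)))
    (fun x => x.2)

-- Python's 'window[pos] = distance' / read of 'window[pos]': pos coming from get_window always
-- satisfies 0 ≤ pos ≤ length-1, a valid index of window, so pyGetD/List.set are exact here.
def updCell (k : Int) (w : List Int) (pd : Int × Int) : List Int :=
  if pd.2 < PySem.List.pyGetD w pd.1 (k + 1) then w.set pd.1.toNat pd.2 else w

def get_phrase_window (indices : List Int) (length : Int) (k : Int) : List (Int × Int) :=
  let window0 : List Int := List.replicate length.toNat (k + 1)
  let idxSet : PySem.Set Int := PySem.Set.ofList indices
  let window : List Int :=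
    idxSet.foldl (fun w index => (get_window index length k).foldl (updCell k) w) window0
  -- Python's enumerate(window), ported via the stack-safe List.zipIdx
  -- (= PySem.List.enumerate by PySem.List.enumerate_eq_zipIdx_map, used in the proof)
  PySem.List.sorted
    ((window.zipIdx.map (fun p => ((p.2 : Int), p.1))).filter
      (fun e => decide (e.2 ≤ k) && !(PySem.Set.contains idxSet e.1)))
    (fun x => x.2)

-- ===== PORT B =====
def get_phrase_window_alt (indices : List Int) (length : Int) (k : Int) : List (Int × Int) :=
  let idx : PySem.Set Int := PySem.Set.ofList indices
  let results : List (Int × Int) :=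
    (PySem.List.pyRange 0 length).foldl
      (fun acc pos =>
        if PySem.Set.contains idx pos then acc
        else
          let d := PySem.List.minD (idx.map (fun i => |pos - i|)) (fun x => x) (k + 1)
          if d ≤ k then acc ++ [(pos, d)] else acc)
      []
  PySem.List.sorted results (fun x => x.2)

-- ===== PRECONDITION & SPEC =====
def Spec_get_phrase_window (indices : List Int) (length : Int) (k : Int) (out : List (Int × Int)) : Prop := out = get_phrase_window_alt indices length k
instance (indices : List Int) (length : Int) (k : Int) (out : List (Int × Int)) : Decidable (Spec_get_phrase_window indices length k out) := by unfold Spec_get_phrase_window; infer_instance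

-- ===== CLAIM (what is proved, stated in full; the proofs are below) =====
def Claim_equal_get_phrase_window : Prop := ∀ (indices : List Int) (length : Int) (k : Int), Dom_get_phrase_window indices length k → Spec_get_phrase_window indices length k (get_phrase_window indices length k)

-- ===== LEMMAS AND PROOFS =====

-- A's per-index, per-cell update, tracked on one cell j.
def winStep (length k j m i : Int) : Int :=
  if (max 0 (i - k) ≤ j ∧ j ≤ min (length - 1) (i + k)) ∧ j ≠ i ∧ |i - j| < m then |i - j| else m

lemma mem_get_window (index length k : Int) (p : Int × Int) :
    p ∈ get_window index length k ↔
      (max 0 (index - k) ≤ p.1 ∧ p.1 < min (length - 1) (index + k) + 1 ∧ p.1 ≠ index ∧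
        p.2 = |index - p.1|) := by
  obtain ⟨a, b⟩ := p
  simp [get_window, PySem.List.mem_sorted, List.mem_filter, PySem.List.mem_pyRange_one]
  aesop

lemma length_foldl_updCell (k : Int) (L : List (Int × Int)) (w : List Int) :
    (L.foldl (updCell k) w).length = w.length := by
  induction L generalizing w with
  | nil => rfl
  | cons p t ih =>
      simp only [List.foldl_cons]
      rw [ih]
      unfold updCell
      split <;> simp

lemma pyGetD_foldl_updCell (k : Int) (L : List (Int × Int)) (w : List Int) (j : Nat)
    (hj : j < w.length) (hb : ∀ p ∈ L, 0 ≤ p.1 ∧ p.1 < (w.length : Int)) :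
    PySem.List.pyGetD (L.foldl (updCell k) w) (j : Int) (k + 1) =
      L.foldl (fun m p => if p.1 = (j : Int) ∧ p.2 < m then p.2 else m)
        (PySem.List.pyGetD w (j : Int) (k + 1)) := by
  induction L generalizing w with
  | nil => rfl
  | cons p t ih =>
      obtain ⟨hp0, hp1⟩ := hb p (by simp)
      have hlen : (updCell k w p).length = w.length := by unfold updCell; split <;> simp
      have hstep : PySem.List.pyGetD (updCell k w p) (j : Int) (k + 1) =
          (if p.1 = (j : Int) ∧ p.2 < PySem.List.pyGetD w (j : Int) (k + 1) then p.2
           else PySem.List.pyGetD w (j : Int) (k + 1)) := by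
        unfold updCell
        by_cases hpj : p.1 = (j : Int)
        · rw [hpj]
          simp only [PySem.List.pyGetD_natCast, Int.toNat_natCast]
          split <;> rename_i h
          · rw [if_pos ⟨trivial, h⟩, List.getD_eq_getElem?_getD,
              List.getElem?_set_self (by omega)]
            simp
          · rw [if_neg fun hc => h hc.2]
        · have hne : p.1.toNat ≠ j := by omega
          split <;> rename_i h
          · simp only [PySem.List.pyGetD_natCast]
            rw [List.getD_eq_getElem?_getD, List.getD_eq_getElem?_getD,
              List.getElem?_set_ne hne]
            rw [if_neg]; intro hc; exact hpj hc.1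
          · rw [if_neg]; intro hc; exact hpj hc.1
      rw [List.foldl_cons, List.foldl_cons, ih _ (by omega) (fun q hq => by
          have := hb q (List.mem_cons_of_mem _ hq); omega), hstep]

lemma foldl_min_const (j c : Int) (L : List (Int × Int)) (m : Int)
    (hc : ∀ p ∈ L, p.1 = j → p.2 = c) :
    L.foldl (fun m p => if p.1 = j ∧ p.2 < m then p.2 else m) m =
      if (∃ p ∈ L, p.1 = j) ∧ c < m then c else m := by
  induction L generalizing m with
  | nil => simp
  | cons p t ih =>
      rw [List.foldl_cons]
      by_cases hpj : p.1 = j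
      · have hpc : p.2 = c := hc p (by simp) hpj
        by_cases hlt : c < m
        · rw [if_pos ⟨hpj, hpc ▸ hlt⟩, hpc,
            ih _ (fun q hq => hc q (List.mem_cons_of_mem _ hq)),
            if_neg (by rintro ⟨_, h⟩; omega), if_pos ⟨⟨p, by simp, hpj⟩, hlt⟩]
        · rw [if_neg (by rintro ⟨_, h⟩; rw [hpc] at h; omega),
            ih _ (fun q hq => hc q (List.mem_cons_of_mem _ hq)),
            if_neg (by rintro ⟨_, h⟩; omega), if_neg (by rintro ⟨_, h⟩; omega)]
      · rw [if_neg (by rintro ⟨h, _⟩; exact hpj h),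
          ih _ (fun q hq => hc q (List.mem_cons_of_mem _ hq))]
        have hiff : (∃ q ∈ p :: t, q.1 = j) ↔ (∃ q ∈ t, q.1 = j) := by
          constructor
          · rintro ⟨q, hq, hqj⟩
            rcases List.mem_cons.mp hq with h | h
            · exact absurd (h ▸ hqj) hpj
            · exact ⟨q, h, hqj⟩
          · rintro ⟨q, hq, hqj⟩; exact ⟨q, List.mem_cons_of_mem _ hq, hqj⟩
        by_cases hex : (∃ q ∈ t, q.1 = j) ∧ c < m
        · rw [if_pos hex, if_pos ⟨hiff.mpr hex.1, hex.2⟩]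
        · rw [if_neg hex, if_neg (fun hc2 => hex ⟨hiff.mp hc2.1, hc2.2⟩)]

lemma length_outer (length k : Int) (S : List Int) (w : List Int) :
    (S.foldl (fun w i => (get_window i length k).foldl (updCell k) w) w).length = w.length := by
  induction S generalizing w with
  | nil => rfl
  | cons i t ih => rw [List.foldl_cons, ih, length_foldl_updCell]

lemma pyGetD_outer (length k : Int) (S : List Int) (w : List Int) (j : Nat)
    (hlen : (w.length : Int) = length) (hj : j < w.length) :
    PySem.List.pyGetD (S.foldl (fun w i => (get_window i length k).foldl (updCell k) w) w)
        (j : Int) (k + 1) =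
      S.foldl (winStep length k (j : Int)) (PySem.List.pyGetD w (j : Int) (k + 1)) := by
  induction S generalizing w with
  | nil => rfl
  | cons i t ih =>
      rw [List.foldl_cons, List.foldl_cons]
      have hb : ∀ p ∈ get_window i length k, 0 ≤ p.1 ∧ p.1 < (w.length : Int) := by
        intro p hp
        rw [mem_get_window] at hp
        constructor
        · exact le_trans (le_max_left _ _) hp.1
        · have := hp.2.1
          omega
      have hw' : (List.foldl (updCell k) w (get_window i length k)).length = w.length :=
        length_foldl_updCell k _ w
      rw [ih _ (by rw [hw']; exact hlen) (by rw [hw']; exact hj),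
        pyGetD_foldl_updCell k _ w j hj hb,
        foldl_min_const (j : Int) (|i - (j : Int)|) _ _
          (fun p hp hpj => by rw [mem_get_window] at hp; rw [← hpj]; exact hp.2.2.2)]
      congr 1
      unfold winStep
      by_cases hcond : (max 0 (i - k) ≤ (j:Int) ∧ (j:Int) ≤ min (length - 1) (i + k)) ∧
          (j:Int) ≠ i ∧ |i - (j:Int)| < PySem.List.pyGetD w (j:Int) (k + 1)
      · rw [if_pos hcond, if_pos]
        refine ⟨⟨((j:Int), |i - (j:Int)|), ?_, rfl⟩, hcond.2.2⟩
        rw [mem_get_window]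
        exact ⟨hcond.1.1, by omega, hcond.2.1, rfl⟩
      · rw [if_neg hcond, if_neg]
        rintro ⟨⟨p, hp, hpj⟩, hlt⟩
        rw [mem_get_window] at hp
        rw [hpj] at hp
        exact hcond ⟨⟨hp.1, by omega⟩, fun h => hp.2.2.1 h, hlt⟩

lemma winStep_eq_min (length k j m i : Int) (h0 : 0 ≤ j) (hl : j < length) (hne : j ≠ i)
    (hm : m ≤ k + 1) : winStep length k j m i = min m |i - j| := by
  unfold winStep
  rw [abs_eq_max_neg]
  split <;> rename_i h
  · omega
  · by_cases hlt : max (i - j) (-(i - j)) < m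
    · exfalso; exact h ⟨⟨by omega, by omega⟩, hne, hlt⟩
    · omega

lemma foldl_winStep_eq_foldl_min (length k j : Int) (h0 : 0 ≤ j) (hl : j < length)
    (S : List Int) : ∀ m : Int, m ≤ k + 1 → j ∉ S →
    S.foldl (winStep length k j) m = S.foldl (fun m i => min m |i - j|) m := by
  induction S with
  | nil => intro m _ _; rfl
  | cons i t ih =>
      intro m hm hnm
      rw [List.foldl_cons, List.foldl_cons,
        winStep_eq_min length k j m i h0 hl (fun h => hnm (h ▸ List.mem_cons_self)) hm]
      exact ih _ (by omega) (fun h => hnm (List.mem_cons_of_mem _ h))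

lemma winStep_fold_eq (length k j : Int) (S : List Int) (h0 : 0 ≤ j) (hl : j < length)
    (hnm : j ∉ S) :
    S.foldl (winStep length k j) (k + 1) =
      min (k + 1) (PySem.List.minD (S.map (fun i => |j - i|)) (fun x => x) (k + 1)) := by
  rw [foldl_winStep_eq_foldl_min length k j h0 hl S (k+1) le_rfl hnm]
  have hmapeq : (S.map fun i => |j - i|) = S.map fun i => |i - j| := by
    exact List.map_congr_left (fun i _ => abs_sub_comm _ _)
  rw [hmapeq]
  cases S with
  | nil => simp [PySem.List.minD, PySem.List.min?]
  | cons i0 t =>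
      rw [List.map_cons, PySem.List.minD, PySem.List.min?_id_cons, Option.getD_some,
        ← List.foldl_map (f := fun i : Int => |i - j|) (g := min), List.map_cons, List.foldl_cons, List.foldl_assoc]

theorem get_phrase_window_eq (indices : List Int) (length k : Int) :
    get_phrase_window indices length k = get_phrase_window_alt indices length k := by
  simp only [get_phrase_window, get_phrase_window_alt]
  set S : List Int := PySem.Set.ofList indices with hS
  set w : List Int :=
    S.foldl (fun w i => (get_window i length k).foldl (updCell k) w)
      (List.replicate length.toNat (k + 1)) with hw
  have hwlen : w.length = length.toNat := by
    rw [hw, length_outer, List.length_replicate]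
  -- the per-position value B computes
  set dB : Int → Int :=
    fun pos => PySem.List.minD (S.map (fun i => |pos - i|)) (fun x => x) (k + 1) with hdB
  -- A's cell value at an in-range, non-index position
  have hcell : ∀ j : Int, 0 ≤ j → j < length → PySem.Set.contains S j = false →
      PySem.List.pyGetD w j (k + 1) = min (k + 1) (dB j) := by
    intro j h0 hl hc
    have hnm : j ∉ S := by simpa [PySem.Set.contains] using hc
    have hj' : j.toNat < w.length := by omega
    have hcast : ((j.toNat : Nat) : Int) = j := by omega
    rw [← hcast, hw, pyGetD_outer length k S _ j.toNat (by simp; omega) (by simp; omega)]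
    rw [PySem.List.pyGetD_natCast, List.getD_replicate _ (by omega), hcast,
      winStep_fold_eq length k j S h0 hl hnm]
  -- rewrite both pre-sort lists to a common form
  congr 1
  -- A side
  have hzip : w.zipIdx.map (fun p => ((p.2 : Int), p.1)) = PySem.List.enumerate w := by
    rw [PySem.List.enumerate_eq_zipIdx_map w 0]
    exact List.map_congr_left fun p _ => by rw [zero_add]
  rw [hzip, PySem.List.enumerate_eq_map_pyRange w (k + 1)]
  have hrange : PySem.List.pyRange 0 (PySem.List.len w) = PySem.List.pyRange 0 length := by
    have : PySem.List.len w = (length.toNat : Int) := by simp [PySem.List.len, hwlen]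
    have h2 : (((length.toNat : Int)) - 0).toNat = (length - 0).toNat := by omega
    rw [this, PySem.List.pyRange_one, PySem.List.pyRange_one, h2]
  rw [hrange, List.filter_map]
  -- B side
  have hbody : (PySem.List.pyRange 0 length).foldl
      (fun acc pos =>
        if PySem.Set.contains S pos then acc
        else
          if dB pos ≤ k then acc ++ [(pos, dB pos)] else acc) [] =
      ((PySem.List.pyRange 0 length).filter
          (fun pos => !PySem.Set.contains S pos && decide (dB pos ≤ k))).map
        (fun pos => (pos, dB pos)) := by
    rw [show (fun (acc : List (Int × Int)) (pos : Int) =>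
        if PySem.Set.contains S pos then acc
        else if dB pos ≤ k then acc ++ [(pos, dB pos)] else acc) =
        (fun acc pos =>
          if (!PySem.Set.contains S pos && decide (dB pos ≤ k)) then
            acc ++ [(pos, dB pos)] else acc) from funext fun acc => funext fun pos => by
          by_cases h1 : pos ∈ S
          · simp [h1, PySem.Set.contains]
          · by_cases h2 : dB pos ≤ k <;> simp [h1, h2, PySem.Set.contains]]
    rw [PySem.List.foldl_append_if]
    simp
  rw [hbody]
  -- predicates agree on the range, values agree on the filtered range
  have hpred : ∀ j ∈ PySem.List.pyRange 0 length,
      ((fun e : Int × Int => decide (e.2 ≤ k) && !(PySem.Set.contains S e.1)) ∘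
        (fun j => (j, PySem.List.pyGetD w j (k + 1)))) j =
      (fun pos => !PySem.Set.contains S pos && decide (dB pos ≤ k)) j := by
    intro j hj
    rw [PySem.List.mem_pyRange_one] at hj
    by_cases hc : PySem.Set.contains S j
    · have : j ∈ S := by simpa using hc
      simp [this]
    · have := hcell j hj.1 hj.2 (by simpa using hc)
      simp only [Function.comp, hc, Bool.not_false, Bool.and_true, Bool.true_and, this]
      rw [decide_eq_decide]
      omega
  rw [List.filter_congr hpred]
  apply List.map_congr_left
  intro j hj
  rw [List.mem_filter, PySem.List.mem_pyRange_one] at hj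
  obtain ⟨⟨h0, hl⟩, hp⟩ := hj
  simp only [Bool.and_eq_true, Bool.not_eq_true', decide_eq_true_eq] at hp
  have := hcell j h0 hl hp.1
  rw [this]
  have : min (k + 1) (dB j) = dB j := by omega
  rw [this]

-- ===== VERDICT (by name: the statement is the Claim_ definition above) =====
theorem get_phrase_window_spec : Claim_equal_get_phrase_window := by
  intro indices length k _
  unfold Spec_get_phrase_window
  exact get_phrase_window_eq indices length k
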